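-- pv_equiv track=rewrite | github.com/ByronAHannaford/AOC2024 | day_01/aoc_2024_day_01.py | part_2
-- ===== SOURCE A (Python) =====
-- from typing import Tuple
--
-- def part_2(input_data: Tuple[list, list]):
--     listOne, listTwo = input_data
--
--     #Use a dict to reduce time complexity
--     count_dict = {}
--     for num in listTwo:
--         if num in count_dict:
--             count_dict[num] += 1
--         else:
--             count_dict[num] = 1
--
--     similarity_score = sum(num * count_dict.get(num, 0) for num in listOne)
--
--     """Solution code for Part 2. Should return the solution."""
--     return similarity_score
-- ===== SOURCE B (Python) =====
-- def part_2(input_data):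
--     listOne, listTwo = input_data
--     ones = {}
--     for v in listOne:
--         ones[v] = ones.get(v, 0) + 1
--     twos = {}
--     for v in listTwo:
--         twos[v] = twos.get(v, 0) + 1
--     return sum(v * c * twos.get(v, 0) for v, c in ones.items())
-- ===== Notes on version B (the rewrite author's own statement) =====
-- stated objective: alternative
-- what changed: B builds frequency dicts for BOTH lists and sums v * count_one[v] * count_two[v] over the distinct values of listOne, replacing A's per-element pass over listOne with a pass over distinct values weighted by their multiplicity.
import Mathlib
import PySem

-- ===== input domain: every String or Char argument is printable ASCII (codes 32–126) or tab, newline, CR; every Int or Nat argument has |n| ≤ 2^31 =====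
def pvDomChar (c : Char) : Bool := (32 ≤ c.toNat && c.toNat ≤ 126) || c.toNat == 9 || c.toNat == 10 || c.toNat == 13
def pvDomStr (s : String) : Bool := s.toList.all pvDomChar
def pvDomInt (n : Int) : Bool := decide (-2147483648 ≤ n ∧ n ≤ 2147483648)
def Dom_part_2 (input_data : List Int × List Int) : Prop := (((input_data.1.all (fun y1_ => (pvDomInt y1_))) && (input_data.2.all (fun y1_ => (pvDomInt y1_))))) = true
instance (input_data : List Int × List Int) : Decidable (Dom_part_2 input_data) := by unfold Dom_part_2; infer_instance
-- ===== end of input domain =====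

-- B sums v * count_one[v] * count_two[v] over the DISTINCT values of listOne (frequency dicts for
-- both lists) instead of A's per-element pass over listOne: an alternative decomposition, same cost.

-- ===== PORT A =====
def part_2 (input_data : List Int × List Int) : Int :=
  let listOne := input_data.1
  let listTwo := input_data.2
  -- for num in listTwo: if num in count_dict: count_dict[num] += 1 else: count_dict[num] = 1
  let count_dict : PySem.Dict Int Int :=
    listTwo.foldl (fun d num =>
      if d.contains num then d.insert num (d.getD num 0 + 1) else d.insert num 1)
      PySem.Dict.empty
  -- sum(num * count_dict.get(num, 0) for num in listOne)
  listOne.foldl (fun s num => s + num * count_dict.getD num 0) 0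

-- ===== PORT B =====
def part_2_alt (input_data : List Int × List Int) : Int :=
  let listOne := input_data.1
  let listTwo := input_data.2
  -- ones[v] = ones.get(v, 0) + 1
  let ones : PySem.Dict Int Int :=
    listOne.foldl (fun d v => d.insert v (d.getD v 0 + 1)) PySem.Dict.empty
  -- twos[v] = twos.get(v, 0) + 1
  let twos : PySem.Dict Int Int :=
    listTwo.foldl (fun d v => d.insert v (d.getD v 0 + 1)) PySem.Dict.empty
  -- sum(v * c * twos.get(v, 0) for v, c in ones.items())
  ones.items.foldl (fun s p => s + p.1 * p.2 * twos.getD p.1 0) 0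

-- ===== PRECONDITION & SPEC =====
def Spec_part_2 (input_data : List Int × List Int) (out : Int) : Prop := out = part_2_alt input_data
instance (input_data : List Int × List Int) (out : Int) : Decidable (Spec_part_2 input_data out) := by unfold Spec_part_2; infer_instance

-- ===== CLAIM =====
def Claim_equal_part_2 : Prop := ∀ (input_data : List Int × List Int), Dom_part_2 input_data → Spec_part_2 input_data (part_2 input_data)

-- ===== LEMMAS AND PROOFS =====

-- Weighting a sum by multiplicities over the distinct values.
theorem sum_map_eq_dedup_count_mul (xs : List Int) (f : Int → Int) :
    (xs.map f).sum
      = ((PySem.Set.ofList xs).map (fun v => (xs.count v : Int) * f v)).sum := by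
  have hnd : (PySem.Set.ofList xs).Nodup := PySem.Set.nodup_ofList xs
  have hfin : (PySem.Set.ofList xs).toFinset = xs.toFinset := by
    ext a; simp [PySem.Set.mem_ofList]
  rw [Finset.sum_list_map_count xs f,
      ← List.sum_toFinset (fun v => (xs.count v : Int) * f v) hnd, hfin]
  refine Finset.sum_congr rfl (fun m _ => ?_)
  rw [nsmul_eq_mul]

-- A's if/else counting loop is the insert-getD counting loop (the else branch inserts 1 = 0 + 1).
theorem part_2_dict_eq (listTwo : List Int) :
    listTwo.foldl (fun d num =>
      if d.contains num then d.insert num (d.getD num 0 + 1) else d.insert num 1)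
      (PySem.Dict.empty : PySem.Dict Int Int)
    = listTwo.foldl (fun d num => d.insert num (d.getD num 0 + 1)) PySem.Dict.empty := by
  refine PySem.List.foldl_congr_mem _ _ _ _ (fun d num _ => ?_)
  by_cases h : d.contains num
  · simp [h]
  · simp [h, PySem.Dict.getD_of_not_contains d (0:Int) (by simpa using h)]

theorem part_2_eq_alt (input_data : List Int × List Int) :
    part_2 input_data = part_2_alt input_data := by
  obtain ⟨listOne, listTwo⟩ := input_data
  show (listOne.foldl (fun s num => s + num *
      (listTwo.foldl (fun d num =>
        if d.contains num then d.insert num (d.getD num 0 + 1) else d.insert num 1)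
        PySem.Dict.empty).getD num 0) 0) = _
  simp only [part_2_dict_eq]
  show _ = ((listOne.foldl (fun d v => d.insert v (d.getD v 0 + 1))
      PySem.Dict.empty).items.foldl (fun s p => s + p.1 * p.2 *
        ((listTwo.foldl (fun d v => d.insert v (d.getD v 0 + 1))
          PySem.Dict.empty).getD p.1 0)) 0)
  rw [PySem.Dict.foldl_insert_getD_add_one_eq_counter,
      PySem.Dict.foldl_insert_getD_add_one_eq_counter,
      PySem.List.foldl_add, PySem.List.foldl_add,
      PySem.Dict.items_counter, List.map_map]
  simp only [zero_add, Function.comp_def, PySem.Dict.getD_counter]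
  rw [sum_map_eq_dedup_count_mul listOne (fun v => v * (listTwo.count v : Int))]
  refine congrArg List.sum (List.map_congr_left (fun v _ => ?_))
  ring

-- ===== VERDICT =====
theorem part_2_spec : Claim_equal_part_2 := by
  intro input_data _
  exact part_2_eq_alt input_data
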